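-- pv_equiv track=rewrite | github.com/ninjaroot-509/more-remesas-sdk | test_sdk.py | _pick_ccys_from_options
-- ===== SOURCE A (Python) =====
-- from typing import Any, Dict, List, Tuple, Optional
--
-- def _pick_ccys_from_options(options: List[Dict]) -> Tuple[str, str]:
--     send_ccy = ""
--     pay_ccy = ""
--     for op in options:
--         if not send_ccy:
--             send_ccy = str(op.get("SendCurrency") or "").upper().strip()
--         if not pay_ccy:
--             pay_ccy = str(op.get("PaymentCurrency") or "").upper().strip()
--         if send_ccy and pay_ccy:
--             break
--     return send_ccy or "XXX", pay_ccy or "XXX"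
-- ===== SOURCE B (Python) =====
-- def _pick_ccys_from_options(options):
--     def first(key):
--         return next((c for op in options
--                      if (c := str(op.get(key) or "").upper().strip())), "XXX")
--     return first("SendCurrency"), first("PaymentCurrency")
-- ===== Notes on version B (the rewrite author's own statement) =====
-- stated objective: simpler
-- what changed: Replaced the single interleaved loop with two accumulators and a break by two independent short-circuiting first-non-empty searches (next over a generator), one per key.
import Mathlib
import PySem

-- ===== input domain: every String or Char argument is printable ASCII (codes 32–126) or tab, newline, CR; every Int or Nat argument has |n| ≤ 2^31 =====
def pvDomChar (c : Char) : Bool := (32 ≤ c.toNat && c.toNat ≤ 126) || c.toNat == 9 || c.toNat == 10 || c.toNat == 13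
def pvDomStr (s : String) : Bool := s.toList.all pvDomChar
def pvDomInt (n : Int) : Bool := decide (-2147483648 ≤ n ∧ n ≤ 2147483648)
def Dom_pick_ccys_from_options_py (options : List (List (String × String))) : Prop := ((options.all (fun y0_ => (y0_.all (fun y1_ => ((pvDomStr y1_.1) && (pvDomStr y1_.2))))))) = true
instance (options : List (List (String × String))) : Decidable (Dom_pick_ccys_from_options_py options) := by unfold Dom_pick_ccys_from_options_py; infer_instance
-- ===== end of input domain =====

-- B replaces A's single interleaved loop (two accumulators + break) with two independent
-- short-circuiting first-non-empty searches, one per key; objective: simpler. Same cost.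


-- ===== PORT A =====
-- norm: str(op.get(key) or "").upper().strip()  (assoc-list first-match lookup = dict.get)
def pvNorm (op : List (String × String)) (key : String) : String :=
  PySem.Str.strip (PySem.Str.upper ((op.lookup key).getD ""))

-- A's single loop: two accumulators, each set once, break when both set
def pvLoopA : List (List (String × String)) → String → String → String × String
  | [], s, p => (s, p)
  | op :: rest, s, p =>
    let s' := if s = "" then pvNorm op "SendCurrency" else s
    let p' := if p = "" then pvNorm op "PaymentCurrency" else p
    if s' ≠ "" ∧ p' ≠ "" then (s', p') else pvLoopA rest s' p'

def pick_ccys_from_options_py (options : List (List (String × String))) : String × String :=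
  let r := pvLoopA options "" ""
  ((if r.1 = "" then "XXX" else r.1), (if r.2 = "" then "XXX" else r.2))

-- ===== PORT B =====
-- first non-empty normalized value for one key, default "XXX" (= next(..., "XXX"))
def pvFirst (options : List (List (String × String))) (key : String) : String :=
  (options.findSome? (fun op =>
    let c := pvNorm op key
    if c = "" then none else some c)).getD "XXX"

def pick_ccys_from_options_py_alt (options : List (List (String × String))) : String × String :=
  (pvFirst options "SendCurrency", pvFirst options "PaymentCurrency")

-- ===== PRECONDITION & SPEC =====
def Spec_pick_ccys_from_options_py (options : List (List (String × String))) (out : String × String) : Prop := out = pick_ccys_from_options_py_alt options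
instance (options : List (List (String × String))) (out : String × String) : Decidable (Spec_pick_ccys_from_options_py options out) := by unfold Spec_pick_ccys_from_options_py; infer_instance

-- ===== CLAIM (what is proved, stated in full; the proofs are below) =====
def Claim_equal_pick_ccys_from_options_py : Prop := ∀ (options : List (List (String × String))), Dom_pick_ccys_from_options_py options → Spec_pick_ccys_from_options_py options (pick_ccys_from_options_py options)

-- ===== LEMMAS AND PROOFS =====
-- pvFirst with default "" instead of "XXX": the value A's accumulators converge to
def pvG (options : List (List (String × String))) (key : String) : String :=
  (options.findSome? (fun op =>
    let c := pvNorm op key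
    if c = "" then none else some c)).getD ""

theorem pvG_cons (op : List (String × String)) (rest : List (List (String × String)))
    (key : String) :
    pvG (op :: rest) key = if pvNorm op key = "" then pvG rest key else pvNorm op key := by
  unfold pvG
  rw [List.findSome?_cons]
  by_cases h : pvNorm op key = "" <;> simp [h]

theorem pvLoopA_cons (op : List (String × String)) (rest : List (List (String × String)))
    (s p : String) :
    pvLoopA (op :: rest) s p =
      (fun s' p' => if s' ≠ "" ∧ p' ≠ "" then (s', p') else pvLoopA rest s' p')
        (if s = "" then pvNorm op "SendCurrency" else s)
        (if p = "" then pvNorm op "PaymentCurrency" else p) := rfl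

-- A's loop invariant: each accumulator, once non-empty, is final; while empty it
-- becomes the first non-empty normalized value of the remaining options.
theorem pvLoopA_eq (options : List (List (String × String))) :
    ∀ s p, pvLoopA options s p =
      ((if s = "" then pvG options "SendCurrency" else s),
       (if p = "" then pvG options "PaymentCurrency" else p)) := by
  induction options with
  | nil => intro s p; simp [pvLoopA, pvG]
  | cons op rest ih =>
    intro s p
    rw [pvLoopA_cons]
    by_cases hs : s = "" <;> by_cases hp : p = ""
    · simp only [if_pos hs, if_pos hp]
      rw [pvG_cons, pvG_cons]
      by_cases h1 : pvNorm op "SendCurrency" = "" <;>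
        by_cases h2 : pvNorm op "PaymentCurrency" = "" <;>
        simp [ih, h1, h2]
    · simp only [if_pos hs, if_neg hp]
      rw [pvG_cons]
      by_cases h1 : pvNorm op "SendCurrency" = "" <;> simp [ih, h1, hp]
    · simp only [if_neg hs, if_pos hp]
      rw [pvG_cons]
      by_cases h2 : pvNorm op "PaymentCurrency" = "" <;> simp [ih, h2, hs]
    · simp only [if_neg hs, if_neg hp]
      simp [hs, hp]

theorem pvG_eq_first (options : List (List (String × String))) (key : String) :
    (if pvG options key = "" then "XXX" else pvG options key) = pvFirst options key := by
  unfold pvG pvFirst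
  cases h : options.findSome? (fun op =>
      let c := pvNorm op key
      if c = "" then none else some c) with
  | none =>
    show (if ("" : String) = "" then "XXX" else "") = "XXX"
    rw [if_pos rfl]
  | some c =>
    have hc : c ≠ "" := by
      obtain ⟨op, _, hop⟩ := List.exists_of_findSome?_eq_some h
      have hop' : (if pvNorm op key = "" then none
          else some (pvNorm op key)) = some c := hop
      by_cases hn : pvNorm op key = ""
      · rw [if_pos hn] at hop'; cases hop'
      · rw [if_neg hn] at hop'
        exact (Option.some.inj hop') ▸ hn
    show (if c = "" then "XXX" else c) = c
    rw [if_neg hc]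

-- ===== VERDICT (by name: the statement is the Claim_ definition above) =====
theorem pick_ccys_from_options_py_spec : Claim_equal_pick_ccys_from_options_py := by
  intro options _
  unfold Spec_pick_ccys_from_options_py pick_ccys_from_options_py pick_ccys_from_options_py_alt
  simp only [pvLoopA_eq]
  exact congrArg₂ Prod.mk (pvG_eq_first options "SendCurrency")
    (pvG_eq_first options "PaymentCurrency")
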